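-- pv_equiv track=rewrite | github.com/Bilkeesgani/D-BILKEES | AI_USE_CASES/process_invoice.py | assign_gl_code
-- ===== SOURCE A (Python) =====
-- GL_CODES = {
--     "6100": "Office Supplies & Equipment",
--     "6200": "Marketing & Advertising",
--     "6300": "Travel & Transportation",
--     "6400": "Utilities & Facility Costs",
--     "6500": "Professional Services",
--     "6600": "Technology & Software",
-- }
--
-- def assign_gl_code(vendor, description, amount):
--     """
--     AI-powered GL code assignment based on vendor and description
--     This simulates what an AI would do by analyzing the context
--     """
--
--     vendor_lower = vendor.lower()
--     description_lower = description.lower()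
--
--     # Office Supplies & Equipment (GL 6100)
--     if any(keyword in vendor_lower for keyword in ['amazon', 'office', 'staples']):
--         if any(keyword in description_lower for keyword in ['chair', 'desk', 'keyboard', 'mouse', 'supplies', 'equipment']):
--             return "6100", GL_CODES["6100"], "High"
--
--     # Marketing & Advertising (GL 6200)
--     if any(keyword in vendor_lower for keyword in ['google', 'facebook', 'meta', 'linkedin', 'ads', 'marketing']):
--         return "6200", GL_CODES["6200"], "High"
--
--     if any(keyword in description_lower for keyword in ['advertising', 'marketing', 'campaign', 'promotion', 'seo']):
--         return "6200", GL_CODES["6200"], "High"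
--
--     # Travel & Transportation (GL 6300)
--     if any(keyword in vendor_lower for keyword in ['airline', 'indigo', 'spicejet', 'vistara', 'delta', 'uber', 'ola']):
--         return "6300", GL_CODES["6300"], "High"
--
--     if any(keyword in description_lower for keyword in ['flight', 'ticket', 'travel', 'hotel', 'transportation']):
--         return "6300", GL_CODES["6300"], "High"
--
--     # Utilities & Facility (GL 6400)
--     if any(keyword in vendor_lower for keyword in ['electric', 'power', 'water', 'gas', 'telecom', 'internet']):
--         return "6400", GL_CODES["6400"], "High"
--
--     if any(keyword in description_lower for keyword in ['electricity', 'utility', 'power', 'water', 'rent']):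
--         return "6400", GL_CODES["6400"], "High"
--
--     # Default: Professional Services (GL 6500)
--     return "6500", GL_CODES["6500"], "Medium"
-- ===== SOURCE B (Python) =====
-- GL_CODES = {
--     "6100": "Office Supplies & Equipment",
--     "6200": "Marketing & Advertising",
--     "6300": "Travel & Transportation",
--     "6400": "Utilities & Facility Costs",
--     "6500": "Professional Services",
--     "6600": "Technology & Software",
-- }
--
-- # Inverted priority index: each keyword group carries the priority of the rule it
-- # belongs to (lower = earlier rule).  Instead of an early-return cascade, B scores
-- # the invoice: it collects the priorities of ALL matching groups and takes the
-- # minimum.  Priority 1 (office supplies, GL 6100) is conjunctive: it only counts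
-- # if both the vendor group and the description group matched.
-- VENDOR_GROUPS = [
--     (1, ("amazon", "office", "staples")),
--     (2, ("google", "facebook", "meta", "linkedin", "ads", "marketing")),
--     (4, ("airline", "indigo", "spicejet", "vistara", "delta", "uber", "ola")),
--     (6, ("electric", "power", "water", "gas", "telecom", "internet")),
-- ]
-- DESC_GROUPS = [
--     (1, ("chair", "desk", "keyboard", "mouse", "supplies", "equipment")),
--     (3, ("advertising", "marketing", "campaign", "promotion", "seo")),
--     (5, ("flight", "ticket", "travel", "hotel", "transportation")),
--     (7, ("electricity", "utility", "power", "water", "rent")),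
-- ]
-- PRIO_CODE = {1: "6100", 2: "6200", 3: "6200", 4: "6300", 5: "6300", 6: "6400", 7: "6400"}
--
--
-- def assign_gl_code(vendor, description, amount):
--     vl = vendor.lower()
--     dl = description.lower()
--     vhits = [p for p, kws in VENDOR_GROUPS if any(k in vl for k in kws)]
--     dhits = [p for p, kws in DESC_GROUPS if any(k in dl for k in kws)]
--     hits = vhits + dhits
--     if not (1 in vhits and 1 in dhits):
--         hits = [p for p in hits if p != 1]
--     best = min(hits, default=8)
--     code = PRIO_CODE.get(best, "6500")
--     return code, GL_CODES[code], ("High" if best != 8 else "Medium")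
-- ===== Notes on version B (the rewrite author's own statement) =====
-- stated objective: alternative
-- what changed: Instead of A's chain of early-return if-branches, B scores the invoice against an inverted priority index: it collects the priorities of all matching keyword groups (dropping the conjunctive priority-1 office-supplies hit unless both its vendor and description groups matched), takes the minimum priority, and maps it to a GL code via a lookup table.
import Mathlib
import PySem

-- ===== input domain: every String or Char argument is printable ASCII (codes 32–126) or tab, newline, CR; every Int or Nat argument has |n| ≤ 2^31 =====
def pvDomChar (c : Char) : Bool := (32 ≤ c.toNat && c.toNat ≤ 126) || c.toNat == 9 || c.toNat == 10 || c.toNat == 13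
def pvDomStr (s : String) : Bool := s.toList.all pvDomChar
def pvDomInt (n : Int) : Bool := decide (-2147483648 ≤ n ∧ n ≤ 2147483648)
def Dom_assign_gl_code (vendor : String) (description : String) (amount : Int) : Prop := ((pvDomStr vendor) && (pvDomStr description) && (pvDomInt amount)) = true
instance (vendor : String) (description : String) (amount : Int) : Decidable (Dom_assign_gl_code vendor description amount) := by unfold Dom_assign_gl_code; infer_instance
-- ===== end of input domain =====

-- B replaces A's early-return cascade by an inverted priority index: it collects
-- the priorities of all matching keyword groups and takes the minimum (objective: alternative).

-- module-level GL_CODES dict, shared by both programs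
def pvGL : PySem.Dict String String := PySem.Dict.ofList
  [("6100", "Office Supplies & Equipment"),
   ("6200", "Marketing & Advertising"),
   ("6300", "Travel & Transportation"),
   ("6400", "Utilities & Facility Costs"),
   ("6500", "Professional Services"),
   ("6600", "Technology & Software")]

-- ===== PORT A =====
-- GL_CODES[k] is ported as getD (the literal keys are always present, so no KeyError).
def assign_gl_code (vendor : String) (description : String) (amount : Int) : String × String × String :=
  let vl := PySem.Str.lower vendor
  let dl := PySem.Str.lower description
  if ["amazon", "office", "staples"].any (fun k => PySem.Str.isIn k vl) ∧
     ["chair", "desk", "keyboard", "mouse", "supplies", "equipment"].any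
       (fun k => PySem.Str.isIn k dl) then ("6100", PySem.Dict.getD pvGL "6100" "", "High")
  else if ["google", "facebook", "meta", "linkedin", "ads", "marketing"].any
       (fun k => PySem.Str.isIn k vl) then ("6200", PySem.Dict.getD pvGL "6200" "", "High")
  else if ["advertising", "marketing", "campaign", "promotion", "seo"].any
       (fun k => PySem.Str.isIn k dl) then ("6200", PySem.Dict.getD pvGL "6200" "", "High")
  else if ["airline", "indigo", "spicejet", "vistara", "delta", "uber", "ola"].any
       (fun k => PySem.Str.isIn k vl) then ("6300", PySem.Dict.getD pvGL "6300" "", "High")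
  else if ["flight", "ticket", "travel", "hotel", "transportation"].any
       (fun k => PySem.Str.isIn k dl) then ("6300", PySem.Dict.getD pvGL "6300" "", "High")
  else if ["electric", "power", "water", "gas", "telecom", "internet"].any
       (fun k => PySem.Str.isIn k vl) then ("6400", PySem.Dict.getD pvGL "6400" "", "High")
  else if ["electricity", "utility", "power", "water", "rent"].any
       (fun k => PySem.Str.isIn k dl) then ("6400", PySem.Dict.getD pvGL "6400" "", "High")
  else ("6500", PySem.Dict.getD pvGL "6500" "", "Medium")

-- ===== PORT B =====
def pvVendorGroups : List (Int × List String) :=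
  [(1, ["amazon", "office", "staples"]),
   (2, ["google", "facebook", "meta", "linkedin", "ads", "marketing"]),
   (4, ["airline", "indigo", "spicejet", "vistara", "delta", "uber", "ola"]),
   (6, ["electric", "power", "water", "gas", "telecom", "internet"])]

def pvDescGroups : List (Int × List String) :=
  [(1, ["chair", "desk", "keyboard", "mouse", "supplies", "equipment"]),
   (3, ["advertising", "marketing", "campaign", "promotion", "seo"]),
   (5, ["flight", "ticket", "travel", "hotel", "transportation"]),
   (7, ["electricity", "utility", "power", "water", "rent"])]

def pvPrioCode : PySem.Dict Int String := PySem.Dict.ofList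
  [(1, "6100"), (2, "6200"), (3, "6200"), (4, "6300"), (5, "6300"), (6, "6400"), (7, "6400")]

def assign_gl_code_alt (vendor : String) (description : String) (amount : Int) : String × String × String :=
  let vl := PySem.Str.lower vendor
  let dl := PySem.Str.lower description
  let vhits := (pvVendorGroups.filter (fun g => g.2.any (fun k => PySem.Str.isIn k vl))).map Prod.fst
  let dhits := (pvDescGroups.filter (fun g => g.2.any (fun k => PySem.Str.isIn k dl))).map Prod.fst
  let hits0 := vhits ++ dhits
  let hits := if ¬ (vhits.contains 1 ∧ dhits.contains 1) then hits0.filter (fun p => p ≠ 1) else hits0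
  let best := (PySem.List.min? hits (fun x => x)).getD 8
  let code := PySem.Dict.getD pvPrioCode best "6500"
  (code, PySem.Dict.getD pvGL code "", if best ≠ 8 then "High" else "Medium")

-- ===== PRECONDITION & SPEC =====
def Spec_assign_gl_code (vendor : String) (description : String) (amount : Int) (out : String × String × String) : Prop := out = assign_gl_code_alt vendor description amount
instance (vendor : String) (description : String) (amount : Int) (out : String × String × String) : Decidable (Spec_assign_gl_code vendor description amount out) := by unfold Spec_assign_gl_code; infer_instance

-- ===== CLAIM (what is proved, stated in full; the proofs are below) =====
def Claim_equal_assign_gl_code : Prop := ∀ (vendor : String) (description : String) (amount : Int), Dom_assign_gl_code vendor description amount → Spec_assign_gl_code vendor description amount (assign_gl_code vendor description amount)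

-- ===== LEMMAS AND PROOFS =====

-- ===== VERDICT (by name: the statement is the Claim_ definition above) =====
set_option maxHeartbeats 2000000 in
theorem assign_gl_code_spec : Claim_equal_assign_gl_code := by
  intro vendor description amount _
  unfold Spec_assign_gl_code assign_gl_code assign_gl_code_alt
  simp only [pvVendorGroups, pvDescGroups, List.filter_cons, List.filter_nil]
  generalize (["amazon", "office", "staples"].any
      (fun k => PySem.Str.isIn k (PySem.Str.lower vendor))) = b1
  generalize (["chair", "desk", "keyboard", "mouse", "supplies", "equipment"].any
      (fun k => PySem.Str.isIn k (PySem.Str.lower description))) = b2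
  generalize (["google", "facebook", "meta", "linkedin", "ads", "marketing"].any
      (fun k => PySem.Str.isIn k (PySem.Str.lower vendor))) = b3
  generalize (["advertising", "marketing", "campaign", "promotion", "seo"].any
      (fun k => PySem.Str.isIn k (PySem.Str.lower description))) = b4
  generalize (["airline", "indigo", "spicejet", "vistara", "delta", "uber", "ola"].any
      (fun k => PySem.Str.isIn k (PySem.Str.lower vendor))) = b5
  generalize (["flight", "ticket", "travel", "hotel", "transportation"].any
      (fun k => PySem.Str.isIn k (PySem.Str.lower description))) = b6
  generalize (["electric", "power", "water", "gas", "telecom", "internet"].any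
      (fun k => PySem.Str.isIn k (PySem.Str.lower vendor))) = b7
  generalize (["electricity", "utility", "power", "water", "rent"].any
      (fun k => PySem.Str.isIn k (PySem.Str.lower description))) = b8
  revert b1 b2 b3 b4 b5 b6 b7 b8
  decide
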